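-- pv_equiv track=rewrite | github.com/wyattanderson/proxmox-backup-client-rpm | scripts/vendor-from-archive.py | split_version_part
-- ===== SOURCE A (Python) =====
-- from typing import Any, Iterable
--
-- def split_version_part(part: str) -> Iterable[tuple[str, str]]:
--     index = 0
--     while index < len(part):
--         start = index
--         while index < len(part) and not part[index].isdigit():
--             index += 1
--         if start != index:
--             yield ("non-digit", part[start:index])
--         start = index
--         while index < len(part) and part[index].isdigit():
--             index += 1
--         if start != index:
--             yield ("digit", part[start:index])
-- ===== SOURCE B (Python) =====
-- from typing import Any, Iterable
--
-- def split_version_part(part: str) -> Iterable[tuple[str, str]]: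
--     # Right-to-left fold: each character is merged into the head token of the
--     # accumulator when its class matches, otherwise it starts a new head token.
--     tokens: list[tuple[str, str]] = []
--     for c in reversed(part):
--         label = "digit" if c.isdigit() else "non-digit"
--         if tokens and tokens[0][0] == label:
--             tokens[0] = (label, c + tokens[0][1])
--         else:
--             tokens.insert(0, (label, c))
--     yield from tokens
-- ===== Notes on version B (the rewrite author's own statement) =====
-- stated objective: alternative
-- what changed: B replaces A's forward index scanner with nested while loops by a right-to-left fold that merges each character into the head token of an accumulator (or starts a new token on a class change), so no indices or inner run-scans exist at all.
import Mathlib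
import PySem

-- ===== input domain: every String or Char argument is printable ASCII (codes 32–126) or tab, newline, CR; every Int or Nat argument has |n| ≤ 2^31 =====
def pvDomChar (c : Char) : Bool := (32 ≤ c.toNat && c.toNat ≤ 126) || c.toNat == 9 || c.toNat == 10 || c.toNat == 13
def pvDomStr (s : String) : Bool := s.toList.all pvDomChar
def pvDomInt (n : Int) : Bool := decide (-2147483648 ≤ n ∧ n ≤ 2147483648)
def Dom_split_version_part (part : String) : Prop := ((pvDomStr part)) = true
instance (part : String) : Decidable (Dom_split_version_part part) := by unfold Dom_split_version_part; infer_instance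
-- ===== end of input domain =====

-- B replaces A's forward index scanner (nested whiles slicing out runs) by a
-- right-to-left fold merging each character into a token accumulator (alternative; same result).

-- ===== PORT A =====
-- 'while index < len(part) and p(part[index]): index += 1' plus the slice part[start:index]:
-- returns (the scanned run, the remainder).
def pvScanWhile (p : Char → Bool) : List Char → List Char × List Char
  | [] => ([], [])
  | c :: cs =>
    if p c then
      let r := pvScanWhile p cs
      (c :: r.1, r.2)
    else ([], c :: cs)

theorem pvScanWhile_eq (p : Char → Bool) (l : List Char) :
    pvScanWhile p l = (l.takeWhile p, l.dropWhile p) := by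
  induction l with
  | nil => rfl
  | cons c cs ih => simp [pvScanWhile, List.takeWhile_cons, List.dropWhile_cons, ih]; split <;> simp

theorem pvScanRest_le (c : Char) (cs : List Char) :
    (List.dropWhile PySem.Chars.isdigit
      (List.dropWhile (fun x => !PySem.Chars.isdigit x) (c :: cs))).length ≤ cs.length := by
  by_cases hd : PySem.Chars.isdigit c
  · simp only [List.dropWhile_cons, hd, Bool.not_true, Bool.false_eq_true, if_false, if_pos hd]
    exact List.length_dropWhile_le _ _
  · have hd' : PySem.Chars.isdigit c = false := by simpa using hd
    simp only [List.dropWhile_cons, hd', Bool.not_false, if_true]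
    exact le_trans (List.length_dropWhile_le _ _) (List.length_dropWhile_le _ _)

-- outer 'while index < len(part)' loop of A
def pvGoA : List Char → List (String × String)
  | [] => []
  | c :: cs =>
    let s1 := pvScanWhile (fun x => !PySem.Chars.isdigit x) (c :: cs)
    let s2 := pvScanWhile PySem.Chars.isdigit s1.2
    (if s1.1 ≠ [] then [("non-digit", String.ofList s1.1)] else []) ++
      ((if s2.1 ≠ [] then [("digit", String.ofList s2.1)] else []) ++ pvGoA s2.2)
termination_by l => l.length
decreasing_by
  simp only [pvScanWhile_eq]
  exact Nat.lt_succ_of_le (pvScanRest_le c cs)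

def split_version_part (part : String) : List (String × String) := pvGoA part.toList

-- ===== PORT B =====
-- body of B's 'for c in reversed(part)' loop: merge c into the head token or start a new one
def pvStep (c : Char) (tokens : List (String × String)) : List (String × String) :=
  let label := if PySem.Chars.isdigit c then "digit" else "non-digit"
  match tokens with
  | (l0, s0) :: rest =>
    if l0 = label then (label, String.ofList (c :: s0.toList)) :: rest
    else (label, String.ofList [c]) :: (l0, s0) :: rest
  | [] => [(label, String.ofList [c])]

-- the loop over reversed(part) building tokens at the front is a right fold
def split_version_part_alt (part : String) : List (String × String) :=
  part.toList.foldr pvStep []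

-- ===== PRECONDITION & SPEC =====
def Spec_split_version_part (part : String) (out : List (String × String)) : Prop := out = split_version_part_alt part
instance (part : String) (out : List (String × String)) : Decidable (Spec_split_version_part part out) := by unfold Spec_split_version_part; infer_instance

-- ===== CLAIM (what is proved, stated in full; the proofs are below) =====
def Claim_equal_split_version_part : Prop := ∀ (part : String), Dom_split_version_part part → Spec_split_version_part part (split_version_part part)

-- ===== LEMMAS AND PROOFS =====

-- reference function: one maximal same-class run per step (used only in the proofs)
def pvGoB : List Char → List (String × String)
  | [] => []
  | c :: cs =>
    let k := PySem.Chars.isdigit c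
    ((if k then "digit" else "non-digit"),
      String.ofList (c :: cs.takeWhile (fun x => PySem.Chars.isdigit x == k))) ::
      pvGoB (cs.dropWhile (fun x => PySem.Chars.isdigit x == k))
termination_by l => l.length
decreasing_by exact Nat.lt_succ_of_le (List.length_dropWhile_le _ _)

theorem pvDropWhile_head_false {p : Char → Bool} {cs : List Char} {c' : Char} {cs' : List Char}
    (h : List.dropWhile p cs = c' :: cs') : p c' = false := by
  induction cs with
  | nil => simp at h
  | cons a l ih =>
    rw [List.dropWhile_cons] at h
    by_cases ha : p a
    · exact ih (by simpa [ha] using h)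
    · simp [ha] at h
      obtain ⟨h1, _⟩ := h
      subst h1
      simpa using ha

theorem pvGoA_digit (c : Char) (cs : List Char) (hd : PySem.Chars.isdigit c = true) :
    pvGoA (c :: cs) =
      ("digit", String.ofList (c :: cs.takeWhile PySem.Chars.isdigit)) ::
        pvGoA (cs.dropWhile PySem.Chars.isdigit) := by
  rw [pvGoA]
  simp [pvScanWhile_eq, List.takeWhile_cons, List.dropWhile_cons, hd]

theorem pvGoA_nondigit (c : Char) (cs : List Char) (hd : PySem.Chars.isdigit c = false) :
    pvGoA (c :: cs) =
      ("non-digit", String.ofList (c :: cs.takeWhile (fun x => !PySem.Chars.isdigit x))) ::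
        pvGoA (cs.dropWhile (fun x => !PySem.Chars.isdigit x)) := by
  rw [pvGoA]
  simp only [pvScanWhile_eq, List.takeWhile_cons, List.dropWhile_cons, hd, Bool.not_false,
    if_true, ne_eq, reduceCtorEq, not_false_eq_true, if_pos, List.cons_append, List.nil_append]
  congr 1
  cases hr : List.dropWhile (fun x => !PySem.Chars.isdigit x) cs with
  | nil => simp [pvGoA]
  | cons c' cs' =>
    have hc' : PySem.Chars.isdigit c' = true := by
      have := pvDropWhile_head_false hr
      simpa using this
    rw [pvGoA_digit c' cs' hc']
    simp [List.takeWhile_cons, List.dropWhile_cons, hc']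

theorem pvGoA_eq_pvGoB (l : List Char) : pvGoA l = pvGoB l := by
  have key : ∀ n (l : List Char), l.length ≤ n → pvGoA l = pvGoB l := by
    intro n
    induction n with
    | zero =>
      intro l h
      have : l = [] := by cases l <;> simp_all
      subst this; simp [pvGoA, pvGoB]
    | succ n ih =>
      intro l h
      cases l with
      | nil => simp [pvGoA, pvGoB]
      | cons c cs =>
        by_cases hd : PySem.Chars.isdigit c
        · rw [pvGoA_digit c cs hd, pvGoB]
          have he : (fun x => PySem.Chars.isdigit x == true)
              = PySem.Chars.isdigit := by
            funext x; simp
          simp only [hd, if_true, he]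
          congr 1
          exact ih _ (le_trans (List.length_dropWhile_le _ _) (Nat.le_of_succ_le_succ h))
        · have hd' : PySem.Chars.isdigit c = false := by simpa using hd
          rw [pvGoA_nondigit c cs hd', pvGoB]
          have he : (fun x => PySem.Chars.isdigit x == false)
              = (fun x => !PySem.Chars.isdigit x) := by
            funext x; simp
          simp only [hd', Bool.false_eq_true, if_false, he]
          congr 1
          exact ih _ (le_trans (List.length_dropWhile_le _ _) (Nat.le_of_succ_le_succ h))
  exact key l.length l le_rfl

-- one fold step on the reference output absorbs c into pvGoB's leading run
theorem pvStep_goB (c : Char) (cs : List Char) :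
    pvStep c (pvGoB cs) = pvGoB (c :: cs) := by
  cases cs with
  | nil => simp [pvStep, pvGoB]
  | cons c' cs' =>
    by_cases hk : PySem.Chars.isdigit c' = PySem.Chars.isdigit c
    · rw [pvGoB, pvGoB]
      simp only [pvStep, hk, List.takeWhile_cons, List.dropWhile_cons, beq_self_eq_true,
        if_true, if_pos rfl, String.toList_ofList]
    · have hne : PySem.Chars.isdigit c' ≠ PySem.Chars.isdigit c := hk
      rw [pvGoB, pvGoB]
      have ht : (PySem.Chars.isdigit c' == PySem.Chars.isdigit c) = false := by
        simpa using hne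
      simp only [List.takeWhile_cons, List.dropWhile_cons, ht, Bool.false_eq_true, if_false,
        List.takeWhile_nil]
      rw [pvStep]
      have hlab : (if PySem.Chars.isdigit c' then "digit" else "non-digit")
          ≠ (if PySem.Chars.isdigit c then "digit" else "non-digit") := by
        cases h1 : PySem.Chars.isdigit c' <;> cases h2 : PySem.Chars.isdigit c <;>
          simp_all <;> decide
      simp only [hlab, if_false]
      conv_rhs => rw [pvGoB]

theorem pvFoldr_eq_pvGoB (l : List Char) : l.foldr pvStep [] = pvGoB l := by
  induction l with
  | nil => simp [pvGoB]
  | cons c cs ih => rw [List.foldr_cons, ih, pvStep_goB]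

-- ===== VERDICT (by name: the statement is the Claim_ definition above) =====
theorem split_version_part_spec : Claim_equal_split_version_part := by
  intro part _
  unfold Spec_split_version_part split_version_part split_version_part_alt
  rw [pvFoldr_eq_pvGoB]
  exact pvGoA_eq_pvGoB part.toList
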